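-- pv_equiv track=rewrite | github.com/HU-ICT-LAB/NanoleafWall | menu.py | search_for_nearest_value
-- ===== SOURCE A (Python) =====
-- def search_for_nearest_value(value, list, direction):
--   value = int(value)
--   if direction == "Up":
--     nearest_number_found = False
--     while nearest_number_found == False:
--       value_exist = list.count(value)
--       if value_exist == 1:
--         return value
--       value += 1
--   if direction == "Down":
--     nearest_number_found = False
--     while nearest_number_found == False:
--       value_exist = list.count(value)
--       if value_exist == 1:
--         return value
--       value = value - 1
-- ===== SOURCE B (Python) =====
-- def search_for_nearest_value(value, list, direction):
--     value = int(value)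
--     counts = {}
--     for x in list:
--         counts[x] = counts.get(x, 0) + 1
--     if direction == "Up":
--         cands = [x for x in list if x >= value and counts[x] == 1]
--         return min(cands) if cands else None
--     if direction == "Down":
--         cands = [x for x in list if x <= value and counts[x] == 1]
--         return max(cands) if cands else None
--     return None
-- ===== Notes on version B (the rewrite author's own statement) =====
-- stated objective: alternative
-- what changed: Replaces A's unbounded step-by-step scan that calls list.count at every candidate integer with a single counting pass plus a min/max over the unique elements on the required side of value.
import Mathlib
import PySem

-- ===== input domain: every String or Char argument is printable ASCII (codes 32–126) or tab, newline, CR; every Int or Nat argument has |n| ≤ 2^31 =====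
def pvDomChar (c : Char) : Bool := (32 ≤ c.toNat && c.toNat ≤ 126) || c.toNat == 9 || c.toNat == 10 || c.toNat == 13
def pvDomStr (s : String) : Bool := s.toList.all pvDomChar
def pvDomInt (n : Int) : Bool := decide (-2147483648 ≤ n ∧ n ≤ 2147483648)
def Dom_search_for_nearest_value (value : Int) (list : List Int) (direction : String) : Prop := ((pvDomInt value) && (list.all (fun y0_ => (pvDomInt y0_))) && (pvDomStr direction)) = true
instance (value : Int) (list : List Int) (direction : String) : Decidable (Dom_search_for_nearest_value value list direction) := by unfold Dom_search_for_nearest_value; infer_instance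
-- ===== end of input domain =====

-- B replaces A's unbounded upward/downward scan (list.count at every integer) by one
-- counting pass and a min/max over the unique elements on the required side of value.

-- ===== PORT A =====
-- A's while-loop is unbounded; the port gives it fuel that, under Pre_, is provably
-- enough to reach the value A returns (a totality guard, not an algorithm change).
def pvUpLoop (list : List Int) : Nat → Int → Option Int
  | 0, _ => none
  | fuel + 1, v => if PySem.List.count list v = 1 then some v else pvUpLoop list fuel (v + 1)

def pvDownLoop (list : List Int) : Nat → Int → Option Int
  | 0, _ => none
  | fuel + 1, v => if PySem.List.count list v = 1 then some v else pvDownLoop list fuel (v - 1)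

def search_for_nearest_value (value : Int) (list : List Int) (direction : String) : Option Int :=
  if direction = "Up" then
    pvUpLoop list ((list.foldl max value - value).toNat + 1) value
  else if direction = "Down" then
    pvDownLoop list ((value - list.foldl min value).toNat + 1) value
  else none

-- ===== PORT B =====
def search_for_nearest_value_alt (value : Int) (list : List Int) (direction : String) : Option Int :=
  let counts := PySem.Dict.counter list
  if direction = "Up" then
    PySem.List.min? (list.filter (fun x => decide (value ≤ x) && (counts.getD x 0 == 1))) (fun y => y)
  else if direction = "Down" then
    PySem.List.max? (list.filter (fun x => decide (x ≤ value) && (counts.getD x 0 == 1))) (fun y => y)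
  else none

-- ===== PRECONDITION & SPEC =====
-- Pre_ excludes exactly the inputs on which A's while-loop never finds an element of
-- count 1 in its direction and so DIVERGES (A returns on every input admitted here).
def Pre_search_for_nearest_value (value : Int) (list : List Int) (direction : String) : Prop :=
  (direction = "Up" → ∃ x ∈ list, value ≤ x ∧ list.count x = 1) ∧
  (direction = "Down" → ∃ x ∈ list, x ≤ value ∧ list.count x = 1)
instance (value : Int) (list : List Int) (direction : String) : Decidable (Pre_search_for_nearest_value value list direction) := by unfold Pre_search_for_nearest_value; infer_instance

def pvWitness_search_for_nearest_value : Int × List Int × String := (5, [3, 7, 7, 9], "Up")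

def Spec_search_for_nearest_value (value : Int) (list : List Int) (direction : String) (out : Option Int) : Prop := out = search_for_nearest_value_alt value list direction
instance (value : Int) (list : List Int) (direction : String) (out : Option Int) : Decidable (Spec_search_for_nearest_value value list direction out) := by unfold Spec_search_for_nearest_value; infer_instance

-- ===== CLAIM (what is proved, stated in full; the proofs are below) =====
def Claim_equal_search_for_nearest_value : Prop := ∀ (value : Int) (list : List Int) (direction : String), Dom_search_for_nearest_value value list direction → Pre_search_for_nearest_value value list direction → Spec_search_for_nearest_value value list direction (search_for_nearest_value value list direction)

-- ===== LEMMAS AND PROOFS =====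

theorem pv_foldl_min_le (t : List Int) (a : Int) :
    List.foldl min a t ≤ a ∧ ∀ y ∈ t, List.foldl min a t ≤ y := by
  induction t generalizing a with
  | nil => simp
  | cons x xs ih =>
    have h := ih (min a x)
    refine ⟨le_trans h.1 (min_le_left _ _), ?_⟩
    intro y hy
    rcases List.mem_cons.mp hy with rfl | hy
    · exact le_trans h.1 (min_le_right _ _)
    · exact h.2 y hy

theorem pv_count_eq_one_mem {list : List Int} {v : Int} (h : list.count v = 1) : v ∈ list := by
  have : 0 < list.count v := by omega
  exact List.count_pos_iff.mp this

theorem pvUpLoop_reach (list : List Int) (m : Int) (hm : list.count m = 1) :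
    ∀ fuel v, v ≤ m → (∀ w, v ≤ w → w < m → list.count w ≠ 1) →
      (m - v).toNat < fuel → pvUpLoop list fuel v = some m := by
  intro fuel
  induction fuel with
  | zero => intro v _ _ h; omega
  | succ f ih =>
    intro v hv hnone hfuel
    by_cases hc : PySem.List.count list v = 1
    · have hc' : list.count v = 1 := by simpa [PySem.List.count] using hc
      have : v = m := by
        by_contra hne
        have hvlt : v < m := lt_of_le_of_ne hv hne
        exact hnone v le_rfl hvlt hc'
      rw [show pvUpLoop list (f + 1) v = if PySem.List.count list v = 1 then some v else pvUpLoop list f (v + 1) from rfl, if_pos hc, this]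
    · have hvne : v ≠ m := by
        intro h; apply hc; simpa [PySem.List.count, h] using hm
      have hvlt : v < m := lt_of_le_of_ne hv hvne
      rw [show pvUpLoop list (f + 1) v = if PySem.List.count list v = 1 then some v else pvUpLoop list f (v + 1) from rfl, if_neg hc]
      exact ih (v + 1) (by omega) (fun w hw1 hw2 => hnone w (by omega) hw2) (by omega)

theorem pvDownLoop_reach (list : List Int) (m : Int) (hm : list.count m = 1) :
    ∀ fuel v, m ≤ v → (∀ w, w ≤ v → m < w → list.count w ≠ 1) →
      (v - m).toNat < fuel → pvDownLoop list fuel v = some m := by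
  intro fuel
  induction fuel with
  | zero => intro v _ _ h; omega
  | succ f ih =>
    intro v hv hnone hfuel
    by_cases hc : PySem.List.count list v = 1
    · have hc' : list.count v = 1 := by simpa [PySem.List.count] using hc
      have : v = m := by
        by_contra hne
        have hvgt : m < v := lt_of_le_of_ne hv (by exact fun h => hne h.symm)
        exact hnone v le_rfl hvgt hc'
      rw [show pvDownLoop list (f + 1) v = if PySem.List.count list v = 1 then some v else pvDownLoop list f (v - 1) from rfl, if_pos hc, this]
    · have hvne : v ≠ m := by
        intro h; apply hc; simpa [PySem.List.count, h] using hm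
      have hvgt : m < v := lt_of_le_of_ne hv (fun h => hvne h.symm)
      rw [show pvDownLoop list (f + 1) v = if PySem.List.count list v = 1 then some v else pvDownLoop list f (v - 1) from rfl, if_neg hc]
      exact ih (v - 1) (by omega) (fun w hw1 hw2 => hnone w (by omega) hw2) (by omega)

theorem pv_mem_filter_up {value : Int} {list : List Int} {x : Int} :
    x ∈ list.filter (fun x => decide (value ≤ x) && ((PySem.Dict.counter list).getD x 0 == 1)) ↔
      x ∈ list ∧ value ≤ x ∧ list.count x = 1 := by
  simp [List.mem_filter, PySem.Dict.getD_counter]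

theorem pv_mem_filter_down {value : Int} {list : List Int} {x : Int} :
    x ∈ list.filter (fun x => decide (x ≤ value) && ((PySem.Dict.counter list).getD x 0 == 1)) ↔
      x ∈ list ∧ x ≤ value ∧ list.count x = 1 := by
  simp [List.mem_filter, PySem.Dict.getD_counter]

-- ===== VERDICT (by name: the statement is the Claim_ definition above) =====
theorem search_for_nearest_value_spec : Claim_equal_search_for_nearest_value := by
  intro value list direction _ hpre
  unfold Spec_search_for_nearest_value search_for_nearest_value search_for_nearest_value_alt
  by_cases hup : direction = "Up"
  · simp only [hup, if_pos]
    obtain ⟨x0, hx0mem, hx0ge, hx0cnt⟩ := hpre.1 hup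
    set cands := list.filter (fun x => decide (value ≤ x) && ((PySem.Dict.counter list).getD x 0 == 1)) with hcands
    have hx0c : x0 ∈ cands := pv_mem_filter_up.mpr ⟨hx0mem, hx0ge, hx0cnt⟩
    obtain ⟨m, hm⟩ : ∃ m, PySem.List.min? cands (fun y => y) = some m := by
      cases h : PySem.List.min? cands (fun y => y) with
      | none =>
        have := (PySem.List.min?_eq_none_iff _ _).mp h
        rw [this] at hx0c; cases hx0c
      | some m => exact ⟨m, rfl⟩
    have hmmemc := PySem.List.min?_mem hm
    obtain ⟨hmmem, hmge, hmcnt⟩ := pv_mem_filter_up.mp hmmemc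
    have hmmin : ∀ y ∈ cands, m ≤ y := fun y hy => PySem.List.min?_isMin hm y hy
    rw [hm]
    refine pvUpLoop_reach list m hmcnt _ value hmge ?_ ?_
    · intro w hw1 hw2 hwc
      have : w ∈ cands := pv_mem_filter_up.mpr ⟨pv_count_eq_one_mem hwc, hw1, hwc⟩
      exact absurd (hmmin w this) (by omega)
    · have := (PySem.List.le_foldl_max list value).2 m hmmem
      omega
  · simp only [hup]
    by_cases hdown : direction = "Down"
    · simp only [hdown]
      obtain ⟨x0, hx0mem, hx0le, hx0cnt⟩ := hpre.2 hdown
      set cands := list.filter (fun x => decide (x ≤ value) && ((PySem.Dict.counter list).getD x 0 == 1)) with hcands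
      have hx0c : x0 ∈ cands := pv_mem_filter_down.mpr ⟨hx0mem, hx0le, hx0cnt⟩
      obtain ⟨m, hm⟩ : ∃ m, PySem.List.max? cands (fun y => y) = some m := by
        cases h : PySem.List.max? cands (fun y => y) with
        | none =>
          have := (PySem.List.max?_eq_none_iff _ _).mp h
          rw [this] at hx0c; cases hx0c
        | some m => exact ⟨m, rfl⟩
      have hmmemc := PySem.List.max?_mem hm
      obtain ⟨hmmem, hmle, hmcnt⟩ := pv_mem_filter_down.mp hmmemc
      have hmmax : ∀ y ∈ cands, y ≤ m := fun y hy => PySem.List.max?_isMax hm y hy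
      rw [hm]
      refine pvDownLoop_reach list m hmcnt _ value hmle ?_ ?_
      · intro w hw1 hw2 hwc
        have : w ∈ cands := pv_mem_filter_down.mpr ⟨pv_count_eq_one_mem hwc, hw1, hwc⟩
        exact absurd (hmmax w this) (by omega)
      · have := (pv_foldl_min_le list value).2 m hmmem
        omega
    · simp [hdown]
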